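-- pv_equiv track=rewrite | github.com/EmilStenstrom/nephele | utils/torrent_util.py | is_cam
-- ===== SOURCE A (Python) =====
-- def is_cam(words):
--     # Strings that identify a low quality movie
--     ignore_identifier = [
--         "cam", "dvdscr", "hc", "hdcam", "hdrip", "hdts", "hdtc", "hqscr", "korsub", "screener", "ts"
--     ]
--     tokens = [word.lower() for word in words]
--     for identifier in ignore_identifier:
--         if identifier in tokens:
--             return True
--
--     return False
-- ===== SOURCE B (Python) =====
-- # B: single short-circuiting pass over the words (lowercase each lazily, test set membership);
-- # no token list is built and the identifiers are never iterated.
-- LOW_QUALITY = frozenset([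
--     "cam", "dvdscr", "hc", "hdcam", "hdrip", "hdts", "hdtc", "hqscr", "korsub", "screener", "ts"
-- ])
--
-- def is_cam(words):
--     for word in words:
--         if word.lower() in LOW_QUALITY:
--             return True
--     return False
-- ===== Notes on version B (the rewrite author's own statement) =====
-- stated objective: alternative
-- what changed: A materialises the whole lowercased token list and then loops over the 11 identifiers, scanning that list linearly for each; B interchanges the loops: one short-circuiting pass over the words, lowercasing each word lazily and testing it directly against a precomputed identifier set, so no token list is built and the identifiers are never iterated.
import Mathlib
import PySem

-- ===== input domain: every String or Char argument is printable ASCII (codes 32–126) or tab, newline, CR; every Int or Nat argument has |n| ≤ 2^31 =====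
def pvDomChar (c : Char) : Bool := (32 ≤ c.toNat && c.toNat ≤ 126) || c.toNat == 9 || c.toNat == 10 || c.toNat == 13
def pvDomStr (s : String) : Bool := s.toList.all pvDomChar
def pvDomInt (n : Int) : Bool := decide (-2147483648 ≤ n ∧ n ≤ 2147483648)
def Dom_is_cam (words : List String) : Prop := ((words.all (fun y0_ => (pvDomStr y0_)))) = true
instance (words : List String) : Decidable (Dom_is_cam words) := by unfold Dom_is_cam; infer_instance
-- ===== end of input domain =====

-- B interchanges A's loops: one short-circuiting pass over the words, each lowercased lazily
-- and tested against a precomputed identifier set (alternative decomposition).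

-- ===== PORT A =====
-- A: build tokens = lowercased words, then loop over the 11 identifiers,
-- returning True as soon as one is found by linear scan of tokens.
def is_cam (words : List String) : Bool :=
  let ignore_identifier : List String :=
    ["cam", "dvdscr", "hc", "hdcam", "hdrip", "hdts", "hdtc", "hqscr", "korsub", "screener", "ts"]
  let tokens := words.map PySem.Str.lower
  ignore_identifier.any (fun identifier => tokens.contains identifier)

-- ===== PORT B =====
def lowQuality : PySem.Set String :=
  PySem.Set.ofList ["cam", "dvdscr", "hc", "hdcam", "hdrip", "hdts", "hdtc", "hqscr", "korsub", "screener", "ts"]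

-- B: single pass over words, early return on the first low-quality word.
def is_cam_alt : List String → Bool
  | [] => false
  | word :: rest =>
    if PySem.Set.contains lowQuality (PySem.Str.lower word) then true
    else is_cam_alt rest

-- ===== PRECONDITION & SPEC =====
def Spec_is_cam (words : List String) (out : Bool) : Prop := out = is_cam_alt words
instance (words : List String) (out : Bool) : Decidable (Spec_is_cam words out) := by unfold Spec_is_cam; infer_instance

-- ===== CLAIM =====
def Claim_equal_is_cam : Prop := ∀ (words : List String), Dom_is_cam words → Spec_is_cam words (is_cam words)

-- ===== LEMMAS AND PROOFS =====
-- B answers "some word lowercases into the identifier set".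
theorem is_cam_alt_eq_true_iff (words : List String) :
    is_cam_alt words = true ↔ ∃ w ∈ words, PySem.Str.lower w ∈ lowQuality := by
  induction words with
  | nil => simp [is_cam_alt]
  | cons w rest ih =>
    simp only [is_cam_alt]
    split
    · next h =>
      simp only [true_iff]
      exact ⟨w, List.mem_cons_self .., by simpa [PySem.Set.contains_iff] using h⟩
    · next h =>
      rw [ih]
      constructor
      · rintro ⟨x, hx, hm⟩; exact ⟨x, List.mem_cons_of_mem _ hx, hm⟩
      · rintro ⟨x, hx, hm⟩
        rcases List.mem_cons.mp hx with rfl | hx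
        · exact absurd (by simpa [PySem.Set.contains_iff] using hm) h
        · exact ⟨x, hx, hm⟩

-- A answers "some identifier occurs among the lowercased words" — the same proposition.
theorem is_cam_eq_alt (words : List String) : is_cam words = is_cam_alt words := by
  rw [Bool.eq_iff_iff, is_cam_alt_eq_true_iff]
  simp only [is_cam, List.any_eq_true, List.contains_eq_mem, List.mem_map, decide_eq_true_eq]
  constructor
  · rintro ⟨id, hid, w, hw, rfl⟩
    exact ⟨w, hw, by simpa [lowQuality, PySem.Set.mem_ofList] using hid⟩
  · rintro ⟨w, hw, hm⟩
    exact ⟨PySem.Str.lower w, by simpa [lowQuality, PySem.Set.mem_ofList] using hm, w, hw, rfl⟩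

-- ===== VERDICT =====
theorem is_cam_spec : Claim_equal_is_cam := by
  intro words _
  unfold Spec_is_cam
  exact is_cam_eq_alt words
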